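-- pv_equiv track=rewrite | github.com/MNico99/Sintaxis-TP02 | automatas.py | A_Guionmedio
-- ===== SOURCE A (Python) =====
-- TRAMPA = -1
--
-- RESULTADO_ACEPTADO = "ACEPTADO"
--
-- RESULTADO_TRAMPA = "TRAMPA"
--
-- RESULTADO_NO_ACEPTADO = "NO_ACEPTADO"
--
-- def d_Guionmedio(estado_anterior, caracter):
--     if estado_anterior == 0 and caracter == "-":
--         return 1
--
--     return TRAMPA
--
-- def A_Guionmedio(cadena):
--     Finales = [1]
--     estado_actual = 0
--
--     for caracter in cadena:
--         estado_proximo = d_Guionmedio(estado_actual, caracter)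
--         if estado_proximo == TRAMPA:
--             return RESULTADO_TRAMPA
--         estado_actual = estado_proximo
--
--     if estado_actual in Finales:
--         return RESULTADO_ACEPTADO
--     else:
--         return RESULTADO_NO_ACEPTADO
-- ===== SOURCE B (Python) =====
-- TRAMPA = -1
-- RESULTADO_ACEPTADO = "ACEPTADO"
-- RESULTADO_TRAMPA = "TRAMPA"
-- RESULTADO_NO_ACEPTADO = "NO_ACEPTADO"
--
-- def A_Guionmedio(cadena):
--     if cadena == "":
--         return RESULTADO_NO_ACEPTADO
--     if cadena == "-":
--         return RESULTADO_ACEPTADO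
--     return RESULTADO_TRAMPA
-- ===== Notes on version B (the rewrite author's own statement) =====
-- stated objective: simpler
-- what changed: Replaces the per-character DFA loop with its transition helper by a closed-form three-way dispatch on the whole string (empty / "-" / anything else).
import Mathlib
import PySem

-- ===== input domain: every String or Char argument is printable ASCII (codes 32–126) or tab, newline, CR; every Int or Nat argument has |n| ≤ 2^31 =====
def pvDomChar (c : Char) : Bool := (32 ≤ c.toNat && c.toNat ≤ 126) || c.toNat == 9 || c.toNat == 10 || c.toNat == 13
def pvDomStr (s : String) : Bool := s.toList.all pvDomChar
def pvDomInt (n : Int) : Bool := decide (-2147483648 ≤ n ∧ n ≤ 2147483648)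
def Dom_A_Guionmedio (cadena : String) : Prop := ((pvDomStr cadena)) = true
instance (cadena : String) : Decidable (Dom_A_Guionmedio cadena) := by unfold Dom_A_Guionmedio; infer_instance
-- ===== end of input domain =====

-- B replaces A's per-character DFA loop by a closed-form dispatch on the whole string (objective: simpler).

-- ===== PORT A =====
-- transition function d_Guionmedio
def dGuionmedio (estado_anterior : Int) (caracter : Char) : Int :=
  if estado_anterior = 0 ∧ caracter = '-' then 1 else -1

-- the for-loop with its early return ("TRAMPA") and the final acceptance test
def aGuionmedioLoop : List Char → Int → String
  | [], estado_actual =>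
      if estado_actual ∈ [(1 : Int)] then "ACEPTADO" else "NO_ACEPTADO"
  | caracter :: rest, estado_actual =>
      let estado_proximo := dGuionmedio estado_actual caracter
      if estado_proximo = -1 then "TRAMPA" else aGuionmedioLoop rest estado_proximo

def A_Guionmedio (cadena : String) : String :=
  aGuionmedioLoop cadena.toList 0

-- ===== PORT B =====
def A_Guionmedio_alt (cadena : String) : String :=
  if cadena = "" then "NO_ACEPTADO"
  else if cadena = "-" then "ACEPTADO"
  else "TRAMPA"

-- ===== PRECONDITION & SPEC =====
def Spec_A_Guionmedio (cadena : String) (out : String) : Prop := out = A_Guionmedio_alt cadena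
instance (cadena : String) (out : String) : Decidable (Spec_A_Guionmedio cadena out) := by unfold Spec_A_Guionmedio; infer_instance

-- ===== CLAIM (what is proved, stated in full; the proofs are below) =====
def Claim_equal_A_Guionmedio : Prop := ∀ (cadena : String), Dom_A_Guionmedio cadena → Spec_A_Guionmedio cadena (A_Guionmedio cadena)

-- ===== LEMMAS AND PROOFS =====

lemma aGuionmedioLoop_cases (l : List Char) :
    aGuionmedioLoop l 0 =
      (if l = [] then "NO_ACEPTADO" else if l = ['-'] then "ACEPTADO" else "TRAMPA") := by
  match l with
  | [] => rfl
  | [c] =>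
      by_cases hc : c = '-'
      · subst hc; rfl
      · simp [aGuionmedioLoop, dGuionmedio, hc]
  | c :: d :: rest =>
      by_cases hc : c = '-'
      · subst hc
        simp [aGuionmedioLoop, dGuionmedio]
      · simp [aGuionmedioLoop, dGuionmedio, hc]

lemma string_eq_iff_toList (s t : String) : s = t ↔ s.toList = t.toList := by
  constructor
  · intro h; rw [h]
  · intro h; exact String.ext (by simpa [String.toList] using h)

-- ===== VERDICT (by name: the statement is the Claim_ definition above) =====
theorem A_Guionmedio_spec : Claim_equal_A_Guionmedio := by
  intro cadena _
  unfold Spec_A_Guionmedio A_Guionmedio A_Guionmedio_alt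
  rw [aGuionmedioLoop_cases]
  simp only [string_eq_iff_toList cadena "", string_eq_iff_toList cadena "-"]
  rfl
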